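-- pv_equiv track=rewrite | github.com/githubpradeep/openstt | metrics.py | wer_stats
-- ===== SOURCE A (Python) =====
-- from typing import Iterable, Sequence
--
-- def edit_distance(reference: Sequence[str], hypothesis: Sequence[str]) -> int:
--     rows = len(reference) + 1
--     cols = len(hypothesis) + 1
--     table = [[0] * cols for _ in range(rows)]
--
--     for row in range(rows):
--         table[row][0] = row
--     for col in range(cols):
--         table[0][col] = col
--
--     for row in range(1, rows):
--         for col in range(1, cols):
--             cost = 0 if reference[row - 1] == hypothesis[col - 1] else 1
--             table[row][col] = min(
--                 table[row - 1][col] + 1,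
--                 table[row][col - 1] + 1,
--                 table[row - 1][col - 1] + cost,
--             )
--     return table[-1][-1]
--
-- def wer_stats(predictions: Iterable[str], references: Iterable[str]) -> tuple[int, int]:
--     edits = 0
--     total = 0
--     for prediction, reference in zip(predictions, references):
--         ref_words = reference.split()
--         hyp_words = prediction.split()
--         edits += edit_distance(ref_words, hyp_words)
--         total += max(len(ref_words), 1)
--     return edits, total
-- ===== SOURCE B (Python) =====
-- from typing import Iterable, Sequence
--
-- def edit_distance(reference: Sequence[str], hypothesis: Sequence[str]) -> int:
--     # top-down memoized recursion on prefix lengths instead of a bottom-up table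
--     memo = {}
--
--     def dist(i: int, j: int) -> int:
--         if i == 0:
--             return j
--         if j == 0:
--             return i
--         if (i, j) not in memo:
--             cost = 0 if reference[i - 1] == hypothesis[j - 1] else 1
--             memo[(i, j)] = min(dist(i - 1, j) + 1, dist(i, j - 1) + 1,
--                                dist(i - 1, j - 1) + cost)
--         return memo[(i, j)]
--
--     return dist(len(reference), len(hypothesis))
--
-- def wer_stats(predictions: Iterable[str], references: Iterable[str]) -> tuple[int, int]:
--     # staged passes: tokenize once, then sum each statistic separately
--     pairs = [(p.split(), r.split()) for p, r in zip(predictions, references)]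
--     edits = sum(edit_distance(r, h) for h, r in pairs)
--     total = sum(max(len(r), 1) for _, r in pairs)
--     return edits, total
-- ===== Notes on version B (the rewrite author's own statement) =====
-- stated objective: alternative
-- what changed: edit_distance is rewritten as top-down memoized recursion on prefix lengths (a dict cache filled on demand, no table allocation and no index loops) instead of A's bottom-up 2D dynamic-programming table, and wer_stats is decomposed into staged passes (tokenize once into a pair list, then sum each statistic) instead of one accumulator loop.
import Mathlib
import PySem

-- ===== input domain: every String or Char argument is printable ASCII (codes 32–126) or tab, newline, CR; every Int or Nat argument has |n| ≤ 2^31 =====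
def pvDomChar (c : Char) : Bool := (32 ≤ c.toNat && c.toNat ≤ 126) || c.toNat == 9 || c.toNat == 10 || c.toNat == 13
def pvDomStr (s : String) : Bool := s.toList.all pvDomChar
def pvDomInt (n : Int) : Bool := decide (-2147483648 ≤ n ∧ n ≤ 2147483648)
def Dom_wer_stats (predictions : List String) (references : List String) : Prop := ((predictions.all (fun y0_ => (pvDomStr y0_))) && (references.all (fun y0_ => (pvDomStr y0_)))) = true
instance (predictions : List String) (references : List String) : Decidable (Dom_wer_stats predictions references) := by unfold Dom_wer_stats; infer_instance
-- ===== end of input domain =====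

-- B replaces A's bottom-up DP table for edit_distance by top-down memoized recursion on
-- prefix lengths, and restructures wer_stats into staged passes (objective: alternative).

-- ===== PORT A =====
-- mutation model for Python's list-of-lists: t[i][j] read / t[i][j] = v write
-- (indices are always in range where A uses them, so getD/set are exact)
def edGet2 (t : List (List Int)) (i j : Nat) : Int := (t.getD i []).getD j 0
def edSet2 (t : List (List Int)) (i j : Nat) (v : Int) : List (List Int) :=
  t.set i ((t.getD i []).set j v)

def edit_distance (reference : List String) (hypothesis : List String) : Int :=
  let rows := reference.length + 1
  let cols := hypothesis.length + 1
  let t0 : List (List Int) := List.replicate rows (List.replicate cols 0)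
  let t1 := (List.range rows).foldl (fun t row => edSet2 t row 0 (row : Int)) t0
  let t2 := (List.range cols).foldl (fun t col => edSet2 t 0 col (col : Int)) t1
  let t3 := (List.range' 1 (rows - 1)).foldl (fun t row =>
    (List.range' 1 (cols - 1)).foldl (fun t col =>
      let cost : Int := if reference.getD (row - 1) "" = hypothesis.getD (col - 1) "" then 0 else 1
      edSet2 t row col (min (min (edGet2 t (row - 1) col + 1) (edGet2 t row (col - 1) + 1))
        (edGet2 t (row - 1) (col - 1) + cost))) t) t2
  edGet2 t3 (rows - 1) (cols - 1)

def wer_stats (predictions : List String) (references : List String) : Int × Int :=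
  (predictions.zip references).foldl
    (fun st pr =>
      let ref_words := PySem.Str.split₀ pr.2
      let hyp_words := PySem.Str.split₀ pr.1
      (st.1 + edit_distance ref_words hyp_words, st.2 + max (ref_words.length : Int) 1))
    (0, 0)

-- ===== PORT B =====
-- dist(i, j) of Source B with the memo dict threaded through explicitly
def edMemoGo (reference : List String) (hypothesis : List String) :
    Nat → Nat → PySem.Dict (Nat × Nat) Int → Int × PySem.Dict (Nat × Nat) Int
  | 0, j, memo => ((j : Int), memo)
  | i+1, 0, memo => (((i+1 : Nat) : Int), memo)
  | i+1, j+1, memo =>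
    match memo.get? (i+1, j+1) with
    | some v => (v, memo)
    | none =>
      let cost : Int := if reference.getD i "" = hypothesis.getD j "" then 0 else 1
      let r1 := edMemoGo reference hypothesis i (j+1) memo
      let r2 := edMemoGo reference hypothesis (i+1) j r1.2
      let r3 := edMemoGo reference hypothesis i j r2.2
      let v := min (min (r1.1 + 1) (r2.1 + 1)) (r3.1 + cost)
      (v, r3.2.insert (i+1, j+1) v)
termination_by i j _ => i + j

def edit_distance_alt (reference : List String) (hypothesis : List String) : Int :=
  (edMemoGo reference hypothesis reference.length hypothesis.length PySem.Dict.empty).1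

def wer_stats_alt (predictions : List String) (references : List String) : Int × Int :=
  let pairs := (predictions.zip references).map
    (fun pr => (PySem.Str.split₀ pr.1, PySem.Str.split₀ pr.2))
  let edits := (pairs.map (fun hr => edit_distance_alt hr.2 hr.1)).sum
  let total := (pairs.map (fun hr => max (hr.2.length : Int) 1)).sum
  (edits, total)

-- ===== PRECONDITION & SPEC =====
def Spec_wer_stats (predictions : List String) (references : List String) (out : Int × Int) : Prop := out = wer_stats_alt predictions references
instance (predictions : List String) (references : List String) (out : Int × Int) : Decidable (Spec_wer_stats predictions references out) := by unfold Spec_wer_stats; infer_instance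

-- ===== CLAIM (what is proved, stated in full; the proofs are below) =====
def Claim_equal_wer_stats : Prop := ∀ (predictions : List String) (references : List String), Dom_wer_stats predictions references → Spec_wer_stats predictions references (wer_stats predictions references)

-- ===== LEMMAS AND PROOFS =====

-- the Levenshtein recurrence both programs compute: pvD i j = distance over the first i
-- reference words and the first j hypothesis words
def pvCost (refs hyps : List String) (i j : Nat) : Int :=
  if refs.getD i "" = hyps.getD j "" then 0 else 1

def pvD (refs hyps : List String) : Nat → Nat → Int
  | 0, j => (j : Int)
  | i+1, 0 => ((i+1 : Nat) : Int)
  | i+1, j+1 => min (min (pvD refs hyps i (j+1) + 1) (pvD refs hyps (i+1) j + 1))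
                    (pvD refs hyps i j + pvCost refs hyps i j)
termination_by i j => (i, j)

theorem pvD_zero_right (refs hyps : List String) (i : Nat) : pvD refs hyps i 0 = (i : Int) := by
  cases i <;> simp [pvD]

def rowA (refs hyps : List String) (i : Nat) : List Int :=
  (List.range (hyps.length + 1)).map (pvD refs hyps i)

def freshRow (hyps : List String) (i : Nat) : List Int :=
  (i : Int) :: List.replicate hyps.length 0

def partRow (refs hyps : List String) (r c : Nat) : List Int :=
  (List.range (hyps.length + 1)).map (fun j => if j ≤ c then pvD refs hyps r j else 0)

def tabT (refs hyps : List String) (r : Nat) : List (List Int) :=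
  (List.range (refs.length + 1)).map (fun i => if i ≤ r then rowA refs hyps i else freshRow hyps i)

def tabU (refs hyps : List String) (r c : Nat) : List (List Int) :=
  (List.range (refs.length + 1)).map (fun i =>
    if i ≤ r then rowA refs hyps i
    else if i = r + 1 then partRow refs hyps (r + 1) c
    else freshRow hyps i)

theorem getD_map_range' {α : Type} (f : Nat → α) (N i : Nat) (hi : i < N) (d : α) :
    ((List.range N).map f).getD i d = f i := by
  rw [List.getD_eq_getElem _ _ (by simpa using hi)]
  simp

-- reads from tabU
theorem tabU_get_up (refs hyps : List String) (r c j : Nat) (hr : r ≤ refs.length)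
    (hj : j ≤ hyps.length) : edGet2 (tabU refs hyps r c) r j = pvD refs hyps r j := by
  unfold edGet2 tabU
  rw [getD_map_range' _ _ _ (by omega)]
  simp only [le_refl, if_pos]
  unfold rowA
  rw [getD_map_range' _ _ _ (by omega)]

theorem tabU_get_cur (refs hyps : List String) (r c j : Nat) (hr : r < refs.length)
    (hj : j ≤ c) (hj2 : j ≤ hyps.length) :
    edGet2 (tabU refs hyps r c) (r+1) j = pvD refs hyps (r+1) j := by
  unfold edGet2 tabU
  rw [getD_map_range' _ _ _ (by omega)]
  rw [if_neg (by omega), if_pos rfl]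
  unfold partRow
  rw [getD_map_range' _ _ _ (by omega)]
  rw [if_pos hj]

-- the write inside the inner loop
theorem tabU_set (refs hyps : List String) (r c : Nat) (hr : r < refs.length) (_hc : c < hyps.length) :
    edSet2 (tabU refs hyps r c) (r+1) (c+1) (pvD refs hyps (r+1) (c+1)) = tabU refs hyps r (c+1) := by
  unfold edSet2
  have hrow : (tabU refs hyps r c).getD (r+1) [] = partRow refs hyps (r+1) c := by
    unfold tabU
    rw [getD_map_range' _ _ _ (by omega)]
    rw [if_neg (by omega), if_pos rfl]
  rw [hrow]
  have hset : (partRow refs hyps (r+1) c).set (c+1) (pvD refs hyps (r+1) (c+1))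
      = partRow refs hyps (r+1) (c+1) := by
    apply List.ext_getElem (by simp [partRow])
    intro j h1 h2
    have hj : j < hyps.length + 1 := by simpa [partRow] using h2
    rw [List.getElem_set]
    simp only [partRow, List.getElem_map, List.getElem_range]
    by_cases e : c + 1 = j
    · subst e; rw [if_pos rfl, if_pos (by omega)]
    · rw [if_neg e]; split_ifs <;> first | rfl | omega
  rw [hset]
  apply List.ext_getElem (by simp [tabU])
  intro i h1 h2
  have hi : i < refs.length + 1 := by simpa [tabU] using h2
  rw [List.getElem_set]
  simp only [tabU, List.getElem_map, List.getElem_range]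
  by_cases e : r + 1 = i
  · subst e; rw [if_pos rfl, if_neg (by omega), if_pos rfl]
  · rw [if_neg e]; split_ifs <;> first | rfl | omega

-- inner loop: columns 1..c of row r+1
theorem inner_fold (refs hyps : List String) (r : Nat) (hr : r < refs.length) :
    ∀ (c : Nat), c ≤ hyps.length →
      (List.range' 1 c).foldl (fun t col =>
        edSet2 t (r+1) col (min (min (edGet2 t ((r+1) - 1) col + 1) (edGet2 t (r+1) (col - 1) + 1))
          (edGet2 t ((r+1) - 1) (col - 1) +
            (if refs.getD ((r+1) - 1) "" = hyps.getD (col - 1) "" then (0:Int) else 1))))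
        (tabU refs hyps r 0)
      = tabU refs hyps r c := by
  intro c
  induction c with
  | zero => intro _; simp
  | succ c ih =>
    intro hc
    have hstep : List.range' 1 (c+1) = List.range' 1 c ++ [1 + c] := by
      simpa using List.range'_concat (s := 1) (n := c) (step := 1)
    rw [hstep, List.foldl_append, ih (by omega), List.foldl_cons, List.foldl_nil]
    have e1 : (1 + c) = c + 1 := by omega
    rw [e1]
    have e2 : (r + 1) - 1 = r := by omega
    have e3 : (c + 1) - 1 = c := by omega
    rw [e2, e3]
    rw [tabU_get_up refs hyps r c (c+1) (by omega) (by omega),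
      tabU_get_cur refs hyps r c c hr (le_refl c) (by omega),
      tabU_get_up refs hyps r c c (by omega) (by omega)]
    have hv : min (min (pvD refs hyps r (c+1) + 1) (pvD refs hyps (r+1) c + 1))
        (pvD refs hyps r c + (if refs.getD r "" = hyps.getD c "" then (0:Int) else 1))
        = pvD refs hyps (r+1) (c+1) := by
      simp [pvD, pvCost]
    rw [hv, tabU_set refs hyps r c hr (by omega)]

theorem fresh_eq_part (refs hyps : List String) (i : Nat) :
    freshRow hyps i = partRow refs hyps i 0 := by
  apply List.ext_getElem (by simp [freshRow, partRow])
  intro j h1 h2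
  have hj : j < hyps.length + 1 := by simpa [partRow] using h2
  simp only [partRow, List.getElem_map, List.getElem_range]
  cases j with
  | zero => simp [freshRow, pvD_zero_right]
  | succ j => simp [freshRow]

theorem tabT_eq_tabU_zero (refs hyps : List String) (r : Nat) :
    tabT refs hyps r = tabU refs hyps r 0 := by
  apply List.ext_getElem (by simp [tabT, tabU])
  intro i h1 h2
  simp only [tabT, tabU, List.getElem_map, List.getElem_range]
  by_cases e1 : i ≤ r
  · rw [if_pos e1, if_pos e1]
  · rw [if_neg e1, if_neg e1]
    by_cases e2 : i = r + 1
    · rw [if_pos e2, e2, fresh_eq_part]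
    · rw [if_neg e2]

theorem tabU_last (refs hyps : List String) (r : Nat) :
    tabU refs hyps r hyps.length = tabT refs hyps (r+1) := by
  apply List.ext_getElem (by simp [tabT, tabU])
  intro i h1 h2
  simp only [tabT, tabU, List.getElem_map, List.getElem_range]
  by_cases e1 : i ≤ r
  · rw [if_pos e1, if_pos (by omega)]
  · rw [if_neg e1]
    by_cases e2 : i = r + 1
    · rw [if_pos e2, if_pos (by omega), e2]
      unfold partRow rowA
      apply List.map_congr_left
      intro j hj
      rw [if_pos (by simp at hj; omega)]
    · rw [if_neg e2, if_neg (by omega)]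

theorem outer_fold (refs hyps : List String) :
    ∀ (r : Nat), r ≤ refs.length →
      (List.range' 1 r).foldl (fun t row =>
        (List.range' 1 hyps.length).foldl (fun t col =>
          edSet2 t row col (min (min (edGet2 t (row - 1) col + 1) (edGet2 t row (col - 1) + 1))
            (edGet2 t (row - 1) (col - 1) +
              (if refs.getD (row - 1) "" = hyps.getD (col - 1) "" then (0:Int) else 1)))) t)
        (tabT refs hyps 0)
      = tabT refs hyps r := by
  intro r
  induction r with
  | zero => intro _; simp
  | succ r ih =>
    intro hr
    have hstep : List.range' 1 (r+1) = List.range' 1 r ++ [1 + r] := by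
      simpa using List.range'_concat (s := 1) (n := r) (step := 1)
    rw [hstep, List.foldl_append, ih (by omega), List.foldl_cons, List.foldl_nil]
    have e1 : (1 + r) = r + 1 := by omega
    rw [e1, tabT_eq_tabU_zero, inner_fold refs hyps r (by omega) hyps.length le_rfl, tabU_last]

def row0c (hyps : List String) (c : Nat) : List Int :=
  (List.range (hyps.length + 1)).map (fun j => if j < c then (j : Int) else 0)

theorem init1_aux (refs hyps : List String) :
    ∀ (r : Nat), r ≤ refs.length + 1 →
      (List.range r).foldl (fun t row => edSet2 t row 0 (row : Int))
        (List.replicate (refs.length+1) (List.replicate (hyps.length+1) 0))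
      = (List.range (refs.length+1)).map
          (fun i => if i < r then freshRow hyps i else List.replicate (hyps.length+1) 0) := by
  intro r
  induction r with
  | zero =>
    intro _
    apply List.ext_getElem (by simp)
    intro i h1 h2
    simp
  | succ r ih =>
    intro hr
    rw [List.range_succ, List.foldl_append, ih (by omega), List.foldl_cons, List.foldl_nil]
    unfold edSet2
    rw [getD_map_range' _ _ _ (by omega), if_neg (by omega)]
    have hset : (List.replicate (hyps.length+1) (0:Int)).set 0 (r : Int) = freshRow hyps r := by
      rw [List.replicate_succ]
      simp [freshRow]
    rw [hset]
    apply List.ext_getElem (by simp)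
    intro i h1 h2
    have hi : i < refs.length + 1 := by simpa using h2
    rw [List.getElem_set]
    simp only [List.getElem_map, List.getElem_range]
    by_cases e : r = i
    · subst e; rw [if_pos rfl, if_pos (by omega)]
    · rw [if_neg e]; split_ifs <;> first | rfl | omega

theorem init2_aux (refs hyps : List String) :
    ∀ (c : Nat), c ≤ hyps.length + 1 →
      (List.range c).foldl (fun t col => edSet2 t 0 col (col : Int))
        ((List.range (refs.length+1)).map
          (fun i => if i < refs.length + 1 then freshRow hyps i else List.replicate (hyps.length+1) 0))
      = (List.range (refs.length+1)).map
          (fun i => if i = 0 then row0c hyps c else freshRow hyps i) := by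
  intro c
  induction c with
  | zero =>
    intro _
    rw [show List.range 0 = ([] : List Nat) from rfl, List.foldl_nil]
    apply List.ext_getElem (by simp)
    intro i h1 h2
    have hi : i < refs.length + 1 := by simpa using h2
    simp only [List.getElem_map, List.getElem_range]
    rw [if_pos hi]
    by_cases e : i = 0
    · subst e
      rw [if_pos rfl]
      apply List.ext_getElem (by simp [freshRow, row0c])
      intro j h3 h4
      have hj : j < hyps.length + 1 := by simpa [row0c] using h4
      simp only [row0c, List.getElem_map, List.getElem_range]
      cases j with
      | zero => simp [freshRow]
      | succ j => simp [freshRow]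
    · rw [if_neg e]
  | succ c ih =>
    intro hc
    rw [show List.range (c+1) = List.range c ++ [c] from List.range_succ,
      List.foldl_append, ih (by omega), List.foldl_cons, List.foldl_nil]
    unfold edSet2
    rw [getD_map_range' _ _ _ (by omega), if_pos rfl]
    have hset : (row0c hyps c).set c (c : Int) = row0c hyps (c+1) := by
      apply List.ext_getElem (by simp [row0c])
      intro j h1 h2
      have hj : j < hyps.length + 1 := by simpa [row0c] using h2
      rw [List.getElem_set]
      simp only [row0c, List.getElem_map, List.getElem_range]
      by_cases e : c = j
      · subst e; rw [if_pos rfl, if_pos (by omega)]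
      · rw [if_neg e]; split_ifs <;> first | rfl | omega
    rw [hset]
    apply List.ext_getElem (by simp)
    intro i h1 h2
    have hi : i < refs.length + 1 := by simpa using h2
    rw [List.getElem_set]
    simp only [List.getElem_map, List.getElem_range]
    by_cases e : (0 : Nat) = i
    · subst e; rw [if_pos rfl, if_pos rfl]
    · rw [if_neg e, if_neg (by omega), if_neg (by omega)]

theorem init2_end (refs hyps : List String) :
    (List.range (refs.length+1)).map
      (fun i => if i = 0 then row0c hyps (hyps.length + 1) else freshRow hyps i)
    = tabT refs hyps 0 := by
  apply List.ext_getElem (by simp [tabT])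
  intro i h1 h2
  simp only [tabT, List.getElem_map, List.getElem_range]
  by_cases e : i = 0
  · subst e
    rw [if_pos rfl, if_pos (by omega)]
    unfold row0c rowA
    apply List.map_congr_left
    intro j hj
    rw [if_pos (by simp at hj; omega)]
    simp [pvD]
  · rw [if_neg e, if_neg (by omega)]

theorem edit_distance_eq_pvD (refs hyps : List String) :
    edit_distance refs hyps = pvD refs hyps refs.length hyps.length := by
  rw [show edit_distance refs hyps = edGet2 ((List.range' 1 refs.length).foldl (fun t row =>
      (List.range' 1 hyps.length).foldl (fun t col =>
        edSet2 t row col (min (min (edGet2 t (row - 1) col + 1) (edGet2 t row (col - 1) + 1))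
          (edGet2 t (row - 1) (col - 1) +
            (if refs.getD (row - 1) "" = hyps.getD (col - 1) "" then (0:Int) else 1)))) t)
      ((List.range (hyps.length+1)).foldl (fun t col => edSet2 t 0 col (col : Int))
        ((List.range (refs.length+1)).foldl (fun t row => edSet2 t row 0 (row : Int))
          (List.replicate (refs.length+1) (List.replicate (hyps.length+1) 0))))) refs.length hyps.length
    from rfl]
  rw [init1_aux refs hyps (refs.length+1) le_rfl, init2_aux refs hyps (hyps.length+1) le_rfl,
    init2_end, outer_fold refs hyps refs.length le_rfl]
  unfold edGet2 tabT
  rw [getD_map_range' _ _ _ (by omega), if_pos le_rfl]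
  unfold rowA
  rw [getD_map_range' _ _ _ (by omega)]

-- B side -----------------------------------------------------------------

-- every value cached in the memo is the Levenshtein value of its key
def GoodMemo (refs hyps : List String) (m : PySem.Dict (Nat × Nat) Int) : Prop :=
  ∀ p v, m.get? p = some v → v = pvD refs hyps p.1 p.2

theorem edMemoGo_spec (refs hyps : List String) :
    ∀ (n i j : Nat) (memo : PySem.Dict (Nat × Nat) Int), i + j ≤ n →
      GoodMemo refs hyps memo →
      (edMemoGo refs hyps i j memo).1 = pvD refs hyps i j ∧
      GoodMemo refs hyps (edMemoGo refs hyps i j memo).2 := by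
  intro n
  induction n with
  | zero =>
    intro i j memo hn hg
    have hi : i = 0 := by omega
    have hj : j = 0 := by omega
    subst hi; subst hj
    exact ⟨by simp [edMemoGo, pvD], by simp only [edMemoGo]; exact hg⟩
  | succ n ih =>
    intro i j memo hn hg
    match i, j with
    | 0, j => exact ⟨by simp [edMemoGo, pvD], by simp only [edMemoGo]; exact hg⟩
    | i+1, 0 => exact ⟨by simp [edMemoGo, pvD_zero_right], by simp only [edMemoGo]; exact hg⟩
    | i+1, j+1 =>
      cases hmv : memo.get? (i+1, j+1) with
      | some v =>
        simp only [edMemoGo, hmv]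
        exact ⟨hg _ _ hmv, hg⟩
      | none =>
        simp only [edMemoGo, hmv]
        obtain ⟨h1v, h1g⟩ := ih i (j+1) memo (by omega) hg
        obtain ⟨h2v, h2g⟩ := ih (i+1) j _ (by omega) h1g
        obtain ⟨h3v, h3g⟩ := ih i j _ (by omega) h2g
        rw [h1v, h2v, h3v]
        constructor
        · conv_rhs => rw [pvD]
          simp [pvCost]
        · intro p v hp
          rw [PySem.Dict.get?_insert] at hp
          by_cases e : p = (i+1, j+1)
          · rw [if_pos e] at hp
            cases hp
            subst e
            conv_rhs => rw [pvD]
            simp [pvCost]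
          · rw [if_neg e] at hp
            exact h3g p v hp

theorem edit_distance_alt_eq_pvD (refs hyps : List String) :
    edit_distance_alt refs hyps = pvD refs hyps refs.length hyps.length := by
  exact (edMemoGo_spec refs hyps (refs.length + hyps.length) refs.length hyps.length
    PySem.Dict.empty le_rfl (by intro p v h; simp [PySem.Dict.get?_empty] at h)).1

theorem ed_eq : edit_distance = edit_distance_alt := by
  funext a b
  rw [edit_distance_eq_pvD, edit_distance_alt_eq_pvD]

-- A's single accumulator loop computes the two staged sums of B
theorem wer_fold (L : List (String × String)) :
    ∀ (a b : Int),
      L.foldl (fun st pr =>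
        (st.1 + edit_distance (PySem.Str.split₀ pr.2) (PySem.Str.split₀ pr.1),
         st.2 + max ((PySem.Str.split₀ pr.2).length : Int) 1)) (a, b)
      = (a + (L.map (fun pr => edit_distance (PySem.Str.split₀ pr.2) (PySem.Str.split₀ pr.1))).sum,
         b + (L.map (fun pr => max ((PySem.Str.split₀ pr.2).length : Int) 1)).sum) := by
  induction L with
  | nil => intro a b; simp
  | cons x xs ih =>
    intro a b
    simp only [List.foldl_cons, List.map_cons, List.sum_cons, ih, Prod.mk.injEq]
    constructor <;> ring

-- ===== VERDICT (by name: the statement is the Claim_ definition above) =====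
theorem wer_stats_spec : Claim_equal_wer_stats := by
  intro predictions references _
  unfold Spec_wer_stats wer_stats wer_stats_alt
  rw [wer_fold, ed_eq]
  simp [List.map_map, Function.comp_def]
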